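-- pv_equiv track=rewrite | github.com/heeeyi/LibraySystem | IntegratedInterface/Books.py | concat_author
-- ===== SOURCE A (Python) =====
-- def concat_author(original_result):
--     output_list = []
--     book_number=[]
--     for row in original_result:
--         if row[0] not in book_number:
--             book_number.append(row[0])
--             output_list.append(list(row))
--         else:
--             output_list[book_number.index(row[0])][2]+=', '+row[2]
--     return output_list
-- ===== SOURCE B (Python) =====
-- def concat_author(original_result):
--     order = []
--     first = {}
--     extras = {}
--     for row in original_result:
--         key = row[0]
--         if key in first:
--             extras[key].append(row[2])
--         else:
--             order.append(key)
--             first[key] = list(row)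
--             extras[key] = []
--     result = []
--     for key in order:
--         row = first[key]
--         for a in extras[key]:
--             row[2] += ', ' + a
--         result.append(row)
--     return result
-- ===== Notes on version B (the rewrite author's own statement) =====
-- stated objective: alternative
-- what changed: A interleaves grouping and output mutation in one pass (scanning book_number with .index to patch rows already emitted); B is two-phase: pass 1 groups rows into an order list plus first-row and extra-authors dicts, pass 2 assembles each output row once by folding its author list.
import Mathlib
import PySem

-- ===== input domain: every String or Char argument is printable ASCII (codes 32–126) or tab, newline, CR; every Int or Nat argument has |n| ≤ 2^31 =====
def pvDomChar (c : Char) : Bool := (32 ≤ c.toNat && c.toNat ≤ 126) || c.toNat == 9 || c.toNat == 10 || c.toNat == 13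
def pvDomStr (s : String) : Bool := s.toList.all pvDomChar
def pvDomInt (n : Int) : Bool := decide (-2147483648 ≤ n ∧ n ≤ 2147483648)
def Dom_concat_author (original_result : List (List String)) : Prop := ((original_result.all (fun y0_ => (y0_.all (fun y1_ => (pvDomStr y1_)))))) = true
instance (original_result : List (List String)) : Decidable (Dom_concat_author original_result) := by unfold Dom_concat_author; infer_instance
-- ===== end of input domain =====

-- B replaces A's interleaved scan-and-mutate pass by two phases (group rows by key into
-- dicts, then assemble each output row once); objective: alternative decomposition, not speed.

-- `xs[i] = f(xs[i])`-style in-place update at an index (identity when out of range; all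
-- admitted inputs keep the index in range)
def pvModAt {α : Type} : List α → Nat → (α → α) → List α
  | [], _, _ => []
  | x :: xs, 0, f => f x :: xs
  | x :: xs, n+1, f => x :: pvModAt xs n f

-- ===== PORT A =====
-- state = (output_list, book_number); row[0]/row[2] via getD "" (Pre_ excludes the inputs
-- where Python's row[0]/row[2]/[idx][2] would raise, so getD is exact on Pre_)
def pvStepA (st : List (List String) × List String) (row : List String) :
    List (List String) × List String :=
  let key := (row[0]?).getD ""
  if key ∉ st.2 then
    (st.1 ++ [row], st.2 ++ [key])
  else
    (pvModAt st.1 ((PySem.List.index? st.2 key).getD 0)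
      (fun r => pvModAt r 2 (fun s => s ++ ", " ++ (row[2]?).getD "")), st.2)

def concat_author (original_result : List (List String)) : List (List String) :=
  (original_result.foldl pvStepA ([], [])).1

-- ===== PORT B =====
-- pass-1 state = (order, first, extras)
def pvStepB (st : List String × PySem.Dict String (List String) × PySem.Dict String (List String))
    (row : List String) :
    List String × PySem.Dict String (List String) × PySem.Dict String (List String) :=
  let key := (row[0]?).getD ""
  if st.2.1.contains key then
    (st.1, st.2.1, st.2.2.modify key [] (fun l => l ++ [(row[2]?).getD ""]))
  else
    (st.1 ++ [key], st.2.1.insert key row, st.2.2.insert key [])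

def pvAssemble (first extras : PySem.Dict String (List String)) (key : String) : List String :=
  (extras.getD key []).foldl
    (fun r a => pvModAt r 2 (fun s => s ++ ", " ++ a))
    ((first.get? key).getD [])

def concat_author_alt (original_result : List (List String)) : List (List String) :=
  let st := original_result.foldl pvStepB ([], PySem.Dict.empty, PySem.Dict.empty)
  st.1.foldl (fun res key => res ++ [pvAssemble st.2.1 st.2.2 key]) []

-- ===== PRECONDITION & SPEC =====
-- Pre_ excludes exactly the inputs where Python A raises IndexError: a row that is empty
-- (row[0]), or two rows sharing a key where either has fewer than 3 columns (the [2] accesses).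
def Pre_concat_author (original_result : List (List String)) : Prop :=
  (∀ r ∈ original_result, r ≠ []) ∧
  original_result.Pairwise (fun a b => a.headI = b.headI → 3 ≤ a.length ∧ 3 ≤ b.length)
instance (original_result : List (List String)) : Decidable (Pre_concat_author original_result) := by
  unfold Pre_concat_author; infer_instance

def pvWitness_concat_author : List (List String) :=
  [["1", "T", "Au"], ["2", "U", "Bv", "x"], ["1", "T", "Cw"]]

def Spec_concat_author (original_result : List (List String)) (out : List (List String)) : Prop := out = concat_author_alt original_result
instance (original_result : List (List String)) (out : List (List String)) : Decidable (Spec_concat_author original_result out) := by unfold Spec_concat_author; infer_instance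

-- ===== CLAIM (what is proved, stated in full; the proofs are below) =====
def Claim_equal_concat_author : Prop := ∀ (original_result : List (List String)), Dom_concat_author original_result → Pre_concat_author original_result → Spec_concat_author original_result (concat_author original_result)

-- ===== LEMMAS AND PROOFS =====

-- the invariant tying A's state to B's state
def pvInv (sA : List (List String) × List String)
    (sB : List String × PySem.Dict String (List String) × PySem.Dict String (List String)) : Prop :=
  sA.2 = sB.1 ∧ sB.1.Nodup ∧
  (∀ x, x ∈ sB.1 ↔ (sB.2.1.get? x).isSome) ∧
  sA.1 = sB.1.map (pvAssemble sB.2.1 sB.2.2)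

lemma pvModAt_map_index {α β : Type} [DecidableEq α] (f : β → β)
    (g : α → β) (key : α) :
    ∀ (order : List α) (i : Nat), order.Nodup →
    PySem.List.index? order key = some i →
    pvModAt (order.map g) i f
      = order.map (fun x => if x = key then f (g x) else g x) := by
  intro order
  induction order with
  | nil => intro i _ h; simp [PySem.List.index?] at h
  | cons h t ih =>
    intro i hnd hidx
    by_cases hk : h = key
    · subst hk
      rw [PySem.List.index?_cons_self] at hidx
      cases hidx
      have hnot : h ∉ t := (List.nodup_cons.mp hnd).1
      simp only [List.map_cons, pvModAt]
      refine congrArg₂ List.cons ?_ ?_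
      · simp
      · exact List.map_congr_left (fun x hx => by
          have hxh : x ≠ h := fun he => hnot (he ▸ hx)
          simp [hxh])
    · rw [PySem.List.index?_cons_of_ne t hk] at hidx
      cases hj : PySem.List.index? t key with
      | none => rw [hj] at hidx; simp at hidx
      | some j =>
        rw [hj] at hidx
        simp only [Option.map_some] at hidx
        cases hidx
        simp only [List.map_cons, pvModAt]
        refine congrArg₂ List.cons ?_ ?_
        · simp [hk]
        · exact ih j (List.nodup_cons.mp hnd).2 hj

lemma pvContains_iff {κ ν : Type} [BEq κ] [LawfulBEq κ] (d : PySem.Dict κ ν) (k : κ) :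
    d.contains k = true ↔ (d.get? k).isSome = true := by
  constructor
  · intro hc
    cases hg : d.get? k with
    | none => rw [PySem.Dict.get?_eq_none_iff_contains] at hg; rw [hg] at hc; cases hc
    | some v => rfl
  · intro hs
    cases hc : d.contains k with
    | true => rfl
    | false =>
      rw [(PySem.Dict.get?_eq_none_iff_contains d k).mpr hc] at hs
      cases hs

lemma pvInv_step (sA : List (List String) × List String)
    (sB : List String × PySem.Dict String (List String) × PySem.Dict String (List String))
    (row : List String) (h : pvInv sA sB) : pvInv (pvStepA sA row) (pvStepB sB row) := by
  obtain ⟨hbn, hnd, hmem, hout⟩ := h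
  have hcontains : sB.2.1.contains ((row[0]?).getD "") = true ↔ ((row[0]?).getD "") ∈ sB.1 := by
    rw [hmem, pvContains_iff]
  by_cases hin : ((row[0]?).getD "") ∈ sB.1
  · -- duplicate key: A mutates output_list[idx][2]; B appends to extras[key]
    have hcon : sB.2.1.contains ((row[0]?).getD "") = true := hcontains.mpr hin
    have hAnotin : ¬ ((row[0]?).getD "") ∉ sA.2 := by rw [hbn]; exact not_not_intro hin
    obtain ⟨i, hi⟩ := Option.isSome_iff_exists.mp
      ((PySem.List.index?_isSome_iff sB.1 ((row[0]?).getD "")).mpr hin)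
    have hA : pvStepA sA row
        = (pvModAt sA.1 i (fun r => pvModAt r 2 (fun s => s ++ ", " ++ (row[2]?).getD "")), sA.2) := by
      simp only [pvStepA]
      rw [if_neg hAnotin, hbn, hi]
      rfl
    have hB : pvStepB sB row
        = (sB.1, sB.2.1, sB.2.2.modify ((row[0]?).getD "") [] (fun l => l ++ [(row[2]?).getD ""])) := by
      simp only [pvStepB]
      rw [if_pos hcon]
    rw [hA, hB]
    refine ⟨hbn, hnd, hmem, ?_⟩
    rw [hout, pvModAt_map_index _ _ ((row[0]?).getD "") sB.1 i hnd hi]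
    apply List.map_congr_left
    intro x hx
    by_cases hxk : x = (row[0]?).getD ""
    · subst hxk
      simp [pvAssemble, PySem.Dict.getD_modify_self, List.foldl_append]
    · rw [if_neg hxk]
      simp only [pvAssemble, PySem.Dict.getD_modify_of_ne _ _ _ hxk]
  · -- new key: A appends row; B records it in order/first/extras
    have hcon : ¬ sB.2.1.contains ((row[0]?).getD "") = true := fun hc => hin (hcontains.mp hc)
    have hAin : ((row[0]?).getD "") ∉ sA.2 := by rw [hbn]; exact hin
    have hA : pvStepA sA row = (sA.1 ++ [row], sA.2 ++ [(row[0]?).getD ""]) := by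
      simp only [pvStepA]
      rw [if_pos hAin]
    have hB : pvStepB sB row
        = (sB.1 ++ [(row[0]?).getD ""], sB.2.1.insert ((row[0]?).getD "") row,
           sB.2.2.insert ((row[0]?).getD "") []) := by
      simp only [pvStepB]
      rw [if_neg hcon]
    rw [hA, hB]
    refine ⟨by rw [hbn], ?_, ?_, ?_⟩
    · exact List.Nodup.append hnd (List.nodup_singleton _) (by simpa using fun hx => hin hx)
    · intro x
      by_cases hxk : x = (row[0]?).getD ""
      · subst hxk
        simp [PySem.Dict.get?_insert_self]
      · rw [PySem.Dict.get?_insert_of_ne _ _ hxk]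
        have hxk' : ¬ x = row[0]?.getD "" := hxk
        simp [List.mem_append, hxk', hmem x]
    · rw [hout, List.map_append]
      refine congrArg₂ (· ++ ·) ?_ ?_
      · apply List.map_congr_left
        intro x hx
        have hxk : x ≠ (row[0]?).getD "" := fun he => hin (he ▸ hx)
        simp only [pvAssemble, PySem.Dict.get?_insert_of_ne _ _ hxk,
          PySem.Dict.getD_insert_of_ne _ _ _ hxk]
      · simp [pvAssemble, PySem.Dict.get?_insert_self, PySem.Dict.getD_insert_self]

lemma pvInv_foldl (l : List (List String)) :
    ∀ sA sB, pvInv sA sB → pvInv (l.foldl pvStepA sA) (l.foldl pvStepB sB) := by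
  induction l with
  | nil => intro sA sB h; exact h
  | cons r t ih => intro sA sB h; exact ih _ _ (pvInv_step sA sB r h)

lemma pvFoldl_append_map (g : String → List String) (l : List String) :
    ∀ acc, l.foldl (fun res key => res ++ [g key]) acc = acc ++ l.map g := by
  induction l with
  | nil => intro acc; simp
  | cons h t ih => intro acc; simp [ih]

-- ===== VERDICT (by name: the statement is the Claim_ definition above) =====
theorem concat_author_spec : Claim_equal_concat_author := by
  intro l _ _
  unfold Spec_concat_author concat_author concat_author_alt
  have h0 : pvInv (([], []) : List (List String) × List String)
      (([], PySem.Dict.empty, PySem.Dict.empty) :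
        List String × PySem.Dict String (List String) × PySem.Dict String (List String)) := by
    refine ⟨rfl, List.nodup_nil, ?_, rfl⟩
    intro x
    simp [show (PySem.Dict.empty : PySem.Dict String (List String)).get? x = none from rfl]
  obtain ⟨_, _, _, hout⟩ := pvInv_foldl l _ _ h0
  rw [pvFoldl_append_map]
  simpa using hout
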